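-- pv_equiv track=rewrite | github.com/spadix0/AoC2020 | 16/translate.py | constrain_valid
-- ===== SOURCE A (Python) =====
-- from bisect import bisect_left, bisect_right
--
-- def constrain_valid(ranges, names, own, nearby):
--     cons = [ names[bisect_right(ranges, v) - 1].copy() for v in own ]
--
--     for t in nearby:
--         tc = [ names[bisect_right(ranges, v) - 1] for v in t ]
--         if all(tc):
--             for acc, n in zip(cons, tc):
--                 acc &= n
--
--     return cons
-- ===== SOURCE B (Python) =====
-- from bisect import bisect_right
-- from collections import Counter
--
-- def constrain_valid(ranges, names, own, nearby):
--     def look(v):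
--         return names[bisect_right(ranges, v) - 1]
--     valid = [t for t in nearby if all(look(v) for v in t)]
--     out = []
--     for j, v in enumerate(own):
--         cols = [look(t[j]) for t in valid if j < len(t)]
--         cnt = Counter(w for c in cols for w in c)
--         out.append({w for w in look(v) if cnt[w] == len(cols)})
--     return out
-- ===== Notes on version B (the rewrite author's own statement) =====
-- stated objective: alternative
-- what changed: A sweeps nearby tickets row-wise, destructively intersecting a per-position list of sets; B filters the valid tickets once and then, per position, builds a Counter of candidate names over that column and keeps exactly the names of own's lookup set whose count equals the number of tickets covering the column - no set-intersection operation at all.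
import Mathlib
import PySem

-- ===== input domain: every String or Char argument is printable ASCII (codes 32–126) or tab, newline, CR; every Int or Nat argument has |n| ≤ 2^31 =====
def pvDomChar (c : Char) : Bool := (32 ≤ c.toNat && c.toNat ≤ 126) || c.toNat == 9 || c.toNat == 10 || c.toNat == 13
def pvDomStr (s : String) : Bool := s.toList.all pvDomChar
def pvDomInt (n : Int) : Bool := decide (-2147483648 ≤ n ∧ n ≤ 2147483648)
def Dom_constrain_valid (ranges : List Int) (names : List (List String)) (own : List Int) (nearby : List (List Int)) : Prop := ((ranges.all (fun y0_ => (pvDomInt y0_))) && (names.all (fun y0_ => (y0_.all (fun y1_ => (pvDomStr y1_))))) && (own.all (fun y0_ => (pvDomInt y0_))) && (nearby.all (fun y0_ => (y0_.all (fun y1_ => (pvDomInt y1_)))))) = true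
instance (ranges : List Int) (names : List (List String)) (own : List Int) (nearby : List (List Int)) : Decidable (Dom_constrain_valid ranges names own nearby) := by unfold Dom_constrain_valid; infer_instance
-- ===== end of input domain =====

-- B replaces A's row-wise destructive set-intersection sweep by a counting algorithm: filter the
-- valid tickets once, then per position build a Counter over the column's candidate names and keep
-- the names counted on every covering ticket (objective: alternative, same cost, no intersections).

-- ===== PORT A =====
-- A: cons = [names[bisect_right(ranges,v)-1].copy() for v in own]; for each nearby ticket build tc,
-- and if all sets are truthy intersect cons with tc position-wise in place (zip truncates).
def constrain_valid (ranges : List Int) (names : List (List String)) (own : List Int) (nearby : List (List Int)) : List (List String) :=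
  let cons := own.map (fun v => PySem.List.pyGetD names (((PySem.List.bisectRight ranges v : Nat) : Int) - 1) [])
  nearby.foldl (fun cons t =>
    let tc := t.map (fun v => PySem.List.pyGetD names (((PySem.List.bisectRight ranges v : Nat) : Int) - 1) [])
    if tc.all (fun n => !n.isEmpty) then
      (cons.zip tc).map (fun p => PySem.Set.inter p.1 p.2) ++ cons.drop tc.length
    else cons) cons

-- ===== PORT B =====
-- Source B's helper look(v) = names[bisect_right(ranges, v) - 1]
def pvLook (ranges : List Int) (names : List (List String)) (v : Int) : List String :=
  PySem.List.pyGetD names (((PySem.List.bisectRight ranges v : Nat) : Int) - 1) []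

def constrain_valid_alt (ranges : List Int) (names : List (List String)) (own : List Int) (nearby : List (List Int)) : List (List String) :=
  let valid := nearby.filter (fun t => (t.map (pvLook ranges names)).all (fun n => !n.isEmpty))
  (PySem.List.enumerate own).map (fun jv =>
    let cols := (valid.filter (fun t => decide (jv.1 < (t.length : Int)))).map
      (fun t => pvLook ranges names (PySem.List.pyGetD t jv.1 0))
    let cnt := PySem.Dict.counter cols.flatten
    PySem.Set.ofList ((pvLook ranges names jv.2).filter (fun w => cnt.getD w 0 == (cols.length : Int))))

-- ===== PRECONDITION & SPEC =====
-- Pre_ excludes (i) the inputs where the Python raises IndexError (a bisect index outside names'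
-- negative-index range) and (ii) a names list whose inner lists are not duplicate-free: names encodes
-- a Python list of SETS (A applies &= to its entries), and under the type convention a set's List
-- encoding holds distinct elements, so duplicated inner lists represent no Python input.
def Pre_constrain_valid (ranges : List Int) (names : List (List String)) (own : List Int) (nearby : List (List Int)) : Prop :=
  (∀ v ∈ own ++ nearby.flatten, PySem.Raise.InRange names.length (((PySem.List.bisectRight ranges v : Nat) : Int) - 1)) ∧
  (∀ s ∈ names, s.Nodup)
instance (ranges : List Int) (names : List (List String)) (own : List Int) (nearby : List (List Int)) : Decidable (Pre_constrain_valid ranges names own nearby) := by unfold Pre_constrain_valid; infer_instance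

def pvWitness_constrain_valid : List Int × List (List String) × List Int × List (List Int) :=
  ([0, 10], [["a", "b"], ["b"]], [5], [[12], [3, 7]])

def Spec_constrain_valid (ranges : List Int) (names : List (List String)) (own : List Int) (nearby : List (List Int)) (out : List (List String)) : Prop := out = constrain_valid_alt ranges names own nearby
instance (ranges : List Int) (names : List (List String)) (own : List Int) (nearby : List (List Int)) (out : List (List String)) : Decidable (Spec_constrain_valid ranges names own nearby out) := by unfold Spec_constrain_valid; infer_instance

-- ===== CLAIM (what is proved, stated in full; the proofs are below) =====
def Claim_equal_constrain_valid : Prop := ∀ (ranges : List Int) (names : List (List String)) (own : List Int) (nearby : List (List Int)), Dom_constrain_valid ranges names own nearby → Pre_constrain_valid ranges names own nearby → Spec_constrain_valid ranges names own nearby (constrain_valid ranges names own nearby)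

-- ===== LEMMAS AND PROOFS =====

-- One row step of A, read at a fixed index j: intersect when the ticket is valid and long enough.
lemma pv_step_getElem (look : Int → List String) (cons : List (List String)) (t : List Int) (j : Nat) :
    ((let tc := t.map look;
      if tc.all (fun n => !n.isEmpty) then
        (cons.zip tc).map (fun p => PySem.Set.inter p.1 p.2) ++ cons.drop tc.length
      else cons))[j]? =
    (cons[j]?).map (fun s =>
      if (t.map look).all (fun n => !n.isEmpty) then
        (if (j : Int) < (t.length : Int) then PySem.Set.inter s (look (PySem.List.pyGetD t (j : Int) 0)) else s)
      else s) := by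
  simp only []
  by_cases hok : (t.map look).all (fun n => !n.isEmpty)
  · simp only [hok, if_true]
    by_cases hc : j < cons.length
    · by_cases ht : j < t.length
      · have hz : j < (cons.zip (t.map look)).length := by simp [List.length_zip]; omega
        rw [List.getElem?_append]
        simp [hc, ht, List.getElem_zip]
      · have hmin : (cons.zip (t.map look)).length = t.length := by
          simp [List.length_zip]; omega
        rw [List.getElem?_append]
        have hjge : ¬ j < ((cons.zip (t.map look)).map (fun p => PySem.Set.inter p.1 p.2)).length := by
          simp [hmin]; omega
        rw [if_neg hjge]
        simp only [List.length_map, hmin, List.getElem?_drop]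
        have hj : t.length + (j - t.length) = j := by omega
        rw [hj]
        simp [List.getElem?_eq_getElem hc]
        omega
    · have h1 : cons[j]? = none := by simp; omega
      have h2 : ((cons.zip (t.map look)).map (fun p => PySem.Set.inter p.1 p.2) ++ cons.drop (t.map look).length)[j]? = none := by
        simp [List.length_zip]
        omega
      rw [h1, h2]; rfl
  · simp [hok]

-- A's whole sweep over nearby, read at a fixed index j, is a column fold over the filtered tickets.
lemma pv_fold_getElem (look : Int → List String) (nb : List (List Int)) (cons : List (List String)) (j : Nat) :
    (nb.foldl (fun cons t =>
        let tc := t.map look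
        if tc.all (fun n => !n.isEmpty) then
          (cons.zip tc).map (fun p => PySem.Set.inter p.1 p.2) ++ cons.drop tc.length
        else cons) cons)[j]? =
    (cons[j]?).map (fun s =>
      (nb.filter (fun t => (t.map look).all (fun n => !n.isEmpty))).foldl
        (fun s t => if (j : Int) < (t.length : Int) then PySem.Set.inter s (look (PySem.List.pyGetD t (j : Int) 0)) else s) s) := by
  induction nb generalizing cons with
  | nil => simp
  | cons t ts ih =>
    rw [List.foldl_cons, ih, pv_step_getElem look cons t j]
    by_cases hok : (t.map look).all (fun n => !n.isEmpty)
    · simp only [List.filter_cons, hok, if_true, List.foldl_cons]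
      cases cons[j]? <;> simp
    · simp only [List.filter_cons]
      rw [if_neg (by simpa using hok)]
      cases cons[j]? <;> simp [hok]

-- A guarded fold over the tickets is the plain intersection fold over the selected column sets.
lemma pv_guard_fold (g : List Int → List String) (j : Int) (l : List (List Int)) (s : List String) :
    l.foldl (fun s t => if j < (t.length : Int) then PySem.Set.inter s (g t) else s) s =
    ((l.filter (fun t => decide (j < (t.length : Int)))).map g).foldl PySem.Set.inter s := by
  induction l generalizing s with
  | nil => rfl
  | cons t ts ih =>
    by_cases h : j < (t.length : Int) <;> simp [h, ih]

-- A left fold of set intersections is one filter by membership in every column set.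
lemma pv_inter_fold (cs : List (List String)) (s : List String) :
    cs.foldl PySem.Set.inter s = s.filter (fun w => cs.all (fun c => c.contains w)) := by
  induction cs generalizing s with
  | nil => simp
  | cons c ts ih =>
    rw [List.foldl_cons, ih]
    unfold PySem.Set.inter
    rw [List.filter_filter]
    apply List.filter_congr
    intro w _
    simp [Bool.and_comm]

-- In duplicate-free column sets, a name's total count over the column reaches the number of sets
-- exactly when it lies in every set.
lemma pv_count_le (cs : List (List String)) (w : String) (h : ∀ c ∈ cs, c.Nodup) :
    cs.flatten.count w ≤ cs.length := by
  induction cs with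
  | nil => simp
  | cons c ts ih =>
    simp only [List.flatten_cons, List.count_append, List.length_cons]
    have h1 : c.count w ≤ 1 := List.nodup_iff_count_le_one.mp (h c (by simp)) w
    have h2 := ih (fun c hc => h c (by simp [hc]))
    omega

lemma pv_count_eq_iff (cs : List (List String)) (w : String) (h : ∀ c ∈ cs, c.Nodup) :
    (cs.flatten.count w = cs.length) ↔ (∀ c ∈ cs, w ∈ c) := by
  induction cs with
  | nil => simp
  | cons c ts ih =>
    simp only [List.flatten_cons, List.count_append, List.length_cons, List.forall_mem_cons]
    have h1 : c.count w ≤ 1 := List.nodup_iff_count_le_one.mp (h c (by simp)) w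
    have h2 := pv_count_le ts w (fun c hc => h c (by simp [hc]))
    have h3 := ih (fun c hc => h c (by simp [hc]))
    have h4 : w ∈ c ↔ 0 < c.count w := (List.count_pos_iff).symm
    constructor
    · intro he
      have hc1 : c.count w = 1 := by omega
      have ht : ts.flatten.count w = ts.length := by omega
      exact ⟨h4.mpr (by omega), (h3.mp ht)⟩
    · rintro ⟨hw, hall⟩
      have hc1 : c.count w = 1 := by
        have := h4.mp hw; omega
      have := h3.mpr hall
      omega

-- look's results are duplicate-free whenever every entry of names is.
lemma pv_look_nodup (ranges : List Int) (names : List (List String)) (h : ∀ s ∈ names, s.Nodup)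
    (v : Int) : (pvLook ranges names v).Nodup := by
  unfold pvLook PySem.List.pyGetD
  cases hq : PySem.List.pyGet? names (((PySem.List.bisectRight ranges v : Nat) : Int) - 1) with
  | none => simp
  | some c =>
    simp only [Option.getD_some]
    exact h c (PySem.List.mem_of_pyGet?_eq_some names hq)

-- ===== VERDICT (by name: the statement is the Claim_ definition above) =====
theorem constrain_valid_spec : Claim_equal_constrain_valid := by
  intro ranges names own nearby _hdom hpre
  unfold Spec_constrain_valid constrain_valid constrain_valid_alt
  apply List.ext_getElem?
  intro j
  refine (pv_fold_getElem (pvLook ranges names) nearby (own.map (pvLook ranges names)) j).trans ?_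
  simp only [PySem.List.getElem?_enumerate, List.getElem?_map, zero_add]
  cases hv : own[j]? with
  | none => simp
  | some v =>
    simp only [Option.map_some]
    congr 1
    rw [pv_guard_fold, pv_inter_fold]
    set cols := ((nearby.filter (fun t => (t.map (pvLook ranges names)).all (fun n => !n.isEmpty))).filter
        (fun t => decide ((j : Int) < (t.length : Int)))).map
        (fun t => pvLook ranges names (PySem.List.pyGetD t (j : Int) 0)) with hcols
    have hnodup : ∀ c ∈ cols, c.Nodup := by
      intro c hc
      rw [hcols] at hc
      obtain ⟨t, _, rfl⟩ := List.mem_map.mp hc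
      exact pv_look_nodup ranges names hpre.2 _
    have hfeq : (pvLook ranges names v).filter (fun w => cols.all (fun c => c.contains w)) =
        (pvLook ranges names v).filter (fun w => (PySem.Dict.counter cols.flatten).getD w 0 == (cols.length : Int)) := by
      apply List.filter_congr
      intro w _
      rw [PySem.Dict.getD_counter]
      have : ((cols.flatten.count w : Nat) : Int) == ((cols.length : Nat) : Int) ↔ cols.flatten.count w = cols.length := by
        simp
      rw [Bool.eq_iff_iff]
      simp only [List.all_eq_true, beq_iff_eq, Int.natCast_inj]
      rw [pv_count_eq_iff cols w hnodup]
      constructor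
      · intro hall c hc; exact List.contains_iff_mem.mp (hall c hc)
      · intro hall c hc; exact List.contains_iff_mem.mpr (hall c hc)
    rw [hfeq]
    rw [PySem.Set.ofList_eq_self_of_nodup]
    exact (pv_look_nodup ranges names hpre.2 v).filter _
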